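-- pv_equiv track=rewrite | github.com/Kol-UI/ArchivePython | Advanced Algorithms/Parc_mini.py | greedy
-- ===== SOURCE A (Python) =====
-- def greedy(matrix, x, y):
--     mini = matrix[y][x]
--     szY = len(matrix) - 1
--     szX = len(matrix[0]) - 1
--     if x == szX and y == szY:
--         return mini
--     elif x == szX:
--         return mini + greedy(matrix, x, y + 1)
--     elif y == szY:
--         return mini + greedy(matrix, x + 1, y)
--     else:
--         if matrix[y+1][x] < matrix[y][x+1]:
--             return mini + greedy(matrix, x, y + 1)
--         else:
--             return mini + greedy(matrix, x + 1, y)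
-- ===== SOURCE B (Python) =====
-- def greedy(matrix, x, y):
--     szY = len(matrix) - 1
--     szX = len(matrix[0]) - 1
--     path = []
--     while x != szX or y != szY:
--         path.append(matrix[y][x])
--         if x == szX or (y != szY and matrix[y + 1][x] < matrix[y][x + 1]):
--             y += 1
--         else:
--             x += 1
--     path.append(matrix[y][x])
--     return sum(path)
-- ===== Notes on version B (the rewrite author's own statement) =====
-- stated objective: alternative
-- what changed: B first materialises the list of cell values along the greedy path with an iterative loop whose 4-way branch is collapsed into one 'go down' boolean predicate, then returns the sum of that list, instead of A's linear recursion that adds on the way back up.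
-- outside the precondition, e.g. on greedy([[1, 2], [3, 4, 5]], 0, 0): A returns 7, B returns 7
import Mathlib
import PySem

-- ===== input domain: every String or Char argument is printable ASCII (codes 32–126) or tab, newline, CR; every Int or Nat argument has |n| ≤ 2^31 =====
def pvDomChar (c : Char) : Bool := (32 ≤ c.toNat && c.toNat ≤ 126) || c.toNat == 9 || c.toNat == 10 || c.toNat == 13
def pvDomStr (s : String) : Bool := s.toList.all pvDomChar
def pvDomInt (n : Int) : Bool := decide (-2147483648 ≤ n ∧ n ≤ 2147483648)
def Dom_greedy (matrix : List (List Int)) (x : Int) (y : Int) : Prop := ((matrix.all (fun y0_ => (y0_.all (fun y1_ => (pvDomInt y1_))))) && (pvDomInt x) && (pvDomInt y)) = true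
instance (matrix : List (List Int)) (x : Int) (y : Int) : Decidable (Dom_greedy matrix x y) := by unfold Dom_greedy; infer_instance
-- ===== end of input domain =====

-- B builds the list of cell values along the greedy path (4-way branch collapsed into one
-- boolean step predicate) and sums it, instead of A's recursion adding on the way back up;
-- return values are proved equal on Pre_ (valid start cell, rectangular matrix).

-- ===== PORT A =====
-- matrix[y][x]; in-range on every cell the path visits inside Pre_, so the default 0 is never used there
def pvCell (matrix : List (List Int)) (x y : Int) : Int :=
  ((PySem.List.pyGet? matrix y).bind (fun r => PySem.List.pyGet? r x)).getD 0

-- A's recursion, made total with a fuel counter ample inside Pre_ (path length < 2(h+w))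
def greedyGo (matrix : List (List Int)) (szX szY : Int) (x y : Int) : Nat → Int
  | 0 => 0
  | fuel + 1 =>
    let mini := pvCell matrix x y
    if x = szX ∧ y = szY then mini
    else if x = szX then mini + greedyGo matrix szX szY x (y + 1) fuel
    else if y = szY then mini + greedyGo matrix szX szY (x + 1) y fuel
    else if pvCell matrix x (y + 1) < pvCell matrix (x + 1) y then
      mini + greedyGo matrix szX szY x (y + 1) fuel
    else mini + greedyGo matrix szX szY (x + 1) y fuel

def greedy (matrix : List (List Int)) (x : Int) (y : Int) : Int :=
  let szY : Int := (matrix.length : Int) - 1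
  let szX : Int := ((matrix.headD []).length : Int) - 1
  greedyGo matrix szX szY x y (2 * (matrix.length + (matrix.headD []).length))

-- ===== PORT B =====
-- B's single step predicate: move down iff at the right edge, or not at the bottom edge
-- and the cell below is strictly smaller than the cell to the right
def pvGoesDown (matrix : List (List Int)) (szX szY : Int) (x y : Int) : Bool :=
  decide (x = szX) || (decide (y ≠ szY) && decide (pvCell matrix x (y + 1) < pvCell matrix (x + 1) y))

-- the list of values appended by B's while loop, plus the final corner cell
def pvPath (matrix : List (List Int)) (szX szY : Int) (x y : Int) : Nat → List Int
  | 0 => []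
  | fuel + 1 =>
    if x = szX ∧ y = szY then [pvCell matrix x y]
    else
      pvCell matrix x y ::
        (if pvGoesDown matrix szX szY x y then pvPath matrix szX szY x (y + 1) fuel
         else pvPath matrix szX szY (x + 1) y fuel)

def greedy_alt (matrix : List (List Int)) (x : Int) (y : Int) : Int :=
  let szY : Int := (matrix.length : Int) - 1
  let szX : Int := ((matrix.headD []).length : Int) - 1
  (pvPath matrix szX szY x y (2 * (matrix.length + (matrix.headD []).length))).sum

-- ===== PRECONDITION & SPEC =====
-- Pre_: a nonempty rectangular matrix and a start cell whose indices are valid Python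
-- indices (negative wraparound included). It excludes ragged matrices, on which A raises
-- for some start cells and returns an accidental row-dependent value for others.
def Pre_greedy (matrix : List (List Int)) (x : Int) (y : Int) : Prop :=
  matrix ≠ [] ∧ (∀ r ∈ matrix, r.length = (matrix.headD []).length) ∧
  -((matrix.headD []).length : Int) ≤ x ∧ x < ((matrix.headD []).length : Int) ∧
  -(matrix.length : Int) ≤ y ∧ y < (matrix.length : Int)
instance (matrix : List (List Int)) (x : Int) (y : Int) : Decidable (Pre_greedy matrix x y) := by
  unfold Pre_greedy; infer_instance

def pvWitness_greedy : List (List Int) × Int × Int := ([[1, 2], [3, 4]], 0, 0)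

def Spec_greedy (matrix : List (List Int)) (x : Int) (y : Int) (out : Int) : Prop := out = greedy_alt matrix x y
instance (matrix : List (List Int)) (x : Int) (y : Int) (out : Int) : Decidable (Spec_greedy matrix x y out) := by unfold Spec_greedy; infer_instance

-- ===== CLAIM (what is proved, stated in full; the proofs are below) =====
def Claim_equal_greedy : Prop := ∀ (matrix : List (List Int)) (x : Int) (y : Int), Dom_greedy matrix x y → Pre_greedy matrix x y → Spec_greedy matrix x y (greedy matrix x y)

-- ===== LEMMAS AND PROOFS =====

-- The sum of B's path list equals A's recursion, for ANY fuel.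
theorem pvPath_sum_eq_go (matrix : List (List Int)) (szX szY : Int) :
    ∀ (fuel : Nat) (x y : Int),
      (pvPath matrix szX szY x y fuel).sum = greedyGo matrix szX szY x y fuel := by
  intro fuel
  induction fuel with
  | zero => intro x y; simp [pvPath, greedyGo]
  | succ n ih =>
    intro x y
    simp only [pvPath, greedyGo, pvGoesDown]
    by_cases hc : x = szX ∧ y = szY
    · simp [hc]
    · by_cases hx : x = szX
      · have hy : ¬ y = szY := fun hy => hc ⟨hx, hy⟩
        simp [hc, hx, hy, ih]
      · by_cases hy : y = szY
        · simp [hc, hx, hy, ih]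
        · by_cases hlt : pvCell matrix x (y + 1) < pvCell matrix (x + 1) y
          · simp [hc, hx, hy, hlt, ih]
          · simp [hc, hx, hy, hlt, ih]

-- ===== VERDICT (by name: the statement is the Claim_ definition above) =====
theorem greedy_spec : Claim_equal_greedy := by
  intro matrix x y _ _
  unfold Spec_greedy greedy greedy_alt
  rw [pvPath_sum_eq_go]
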